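-- pv_equiv track=rewrite | github.com/Mitch36/Wirecut-QAOA | quantum_utils/src/quantum_utils/quantum_utils.py | GetNumQubits
-- ===== SOURCE A (Python) =====
-- def GetNumQubits(numStates: int) -> int:
--     """
--     Calculates the number of qubits based on the number of states.
--     Args:
--         numStates (int): Number of states
--     Returns:
--         int: Number of qubits
--     Raises:
--         Exception: Parameter invalid: numStates; invalid length compared to possible qubits
--     """
--     entries = numStates
--     number = 1
--     multiplicationCount = 0
--     while number < entries:
--         number *= 2
--         multiplicationCount += 1
--         if number == entries:
--             break
--         elif number > entries:
--             raise Exception("Parameter invalid: numStates; invalid length compared to possible qubits")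
--
--     return multiplicationCount
-- ===== SOURCE B (Python) =====
-- def GetNumQubits(numStates: int) -> int:
--     if numStates <= 1:
--         return 0
--     q = numStates.bit_length() - 1
--     if numStates == (1 << q):
--         return q
--     raise Exception("Parameter invalid: numStates; invalid length compared to possible qubits")
-- ===== Notes on version B (the rewrite author's own statement) =====
-- stated objective: simpler
-- what changed: Replaced the doubling while-loop with a closed-form bit_length computation: q = numStates.bit_length()-1 and a single power-of-two check, no loop state.
import Mathlib
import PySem

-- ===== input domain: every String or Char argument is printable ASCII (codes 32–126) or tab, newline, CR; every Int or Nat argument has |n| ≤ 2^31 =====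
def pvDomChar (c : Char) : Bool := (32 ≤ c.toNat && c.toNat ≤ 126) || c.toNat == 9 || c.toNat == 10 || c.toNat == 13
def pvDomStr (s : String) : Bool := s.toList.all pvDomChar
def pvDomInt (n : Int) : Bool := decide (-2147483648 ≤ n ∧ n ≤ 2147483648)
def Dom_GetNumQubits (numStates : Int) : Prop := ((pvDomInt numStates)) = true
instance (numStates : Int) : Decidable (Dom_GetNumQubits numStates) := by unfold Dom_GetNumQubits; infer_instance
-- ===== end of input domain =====

-- B replaces A's doubling while-loop by a closed-form bit-length (Nat.log2) power-of-two check; objective: simpler.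
-- On inputs > 1 that are not a power of two both Pythons raise the same Exception; Pre_ excludes exactly those.


-- ===== PORT A =====
-- A's while loop; fuel = entries.toNat only makes the loop total (the loop runs ≤ log2 entries ≤ entries.toNat
-- iterations whenever it is entered). The `number' > entries` branch is Python's raise; Pre_ excludes it
-- (the returned value there is never claimed).
def pvLoopA (fuel : Nat) (entries number mult : Int) : Int :=
  match fuel with
  | 0 => mult
  | fuel + 1 =>
    if number < entries then
      let number' := number * 2
      let mult' := mult + 1
      if number' = entries then mult'
      else if number' > entries then mult'   -- raise Exception(...) in Python; outside Pre_
      else pvLoopA fuel entries number' mult'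
    else mult

def GetNumQubits (numStates : Int) : Int :=
  pvLoopA numStates.toNat numStates 1 0

-- ===== PORT B =====
-- Source B: if numStates <= 1 return 0; q = bit_length - 1 (= Nat.log2 for positive n); power-of-two test.
def GetNumQubits_alt (numStates : Int) : Int :=
  if numStates ≤ 1 then 0
  else
    let q := Nat.log2 numStates.toNat
    if numStates = 2 ^ q then (q : Int)
    else 0   -- raise Exception(...) in Python; outside Pre_

-- ===== PRECONDITION & SPEC =====
-- Pre_ excludes exactly the inputs on which Python A raises its Exception: integers > 1 that are not a
-- power of two (B raises the identical Exception there). k < 32 suffices on Dom (|n| ≤ 2^31).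
def Pre_GetNumQubits (numStates : Int) : Prop :=
  numStates ≤ 1 ∨ ∃ k < 32, numStates = 2 ^ k
instance (numStates : Int) : Decidable (Pre_GetNumQubits numStates) := by
  unfold Pre_GetNumQubits; infer_instance
def pvWitness_GetNumQubits : Int := 1024

def Spec_GetNumQubits (numStates : Int) (out : Int) : Prop := out = GetNumQubits_alt numStates
instance (numStates : Int) (out : Int) : Decidable (Spec_GetNumQubits numStates out) := by unfold Spec_GetNumQubits; infer_instance

-- ===== CLAIM (what is proved, stated in full; the proofs are below) =====
def Claim_equal_GetNumQubits : Prop := ∀ (numStates : Int), Dom_GetNumQubits numStates → Pre_GetNumQubits numStates → Spec_GetNumQubits numStates (GetNumQubits numStates)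

-- ===== LEMMAS AND PROOFS =====

-- A's loop, started at number = 2^j with counter j, reaches entries = 2^k and returns k.
theorem pvLoopA_pow (fuel j k : Nat) (hjk : j ≤ k) (hfuel : k - j ≤ fuel) :
    pvLoopA fuel ((2 : Int) ^ k) ((2 : Int) ^ j) (j : Int) = (k : Int) := by
  induction fuel generalizing j with
  | zero =>
    have hj : j = k := by omega
    subst hj
    simp [pvLoopA]
  | succ fuel ih =>
    by_cases h : j < k
    · have hlt : (2 : Int) ^ j < 2 ^ k := by
        exact pow_lt_pow_right₀ (by norm_num) h
      have hstep : (2 : Int) ^ j * 2 = 2 ^ (j + 1) := by ring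
      by_cases heq : j + 1 = k
      · subst heq
        simp [pvLoopA, hlt, hstep]
      · have hlt2 : (2 : Int) ^ (j + 1) < 2 ^ k := by
          exact pow_lt_pow_right₀ (by norm_num) (by omega)
        have := ih (j + 1) (by omega) (by omega)
        simp only [pvLoopA, if_pos hlt, hstep]
        rw [if_neg (by omega), if_neg (by omega)]
        simpa [Nat.cast_add] using this
    · have hj : j = k := by omega
      subst hj
      simp [pvLoopA]

theorem GetNumQubits_pow (k : Nat) : GetNumQubits (2 ^ k) = (k : Int) := by
  have htoNat : ((2 : Int) ^ k).toNat = 2 ^ k := by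
    have h : ((2 : Int) ^ k) = ((2 ^ k : Nat) : Int) := by push_cast; ring
    rw [h, Int.toNat_natCast]
  have hk2k : k ≤ 2 ^ k := Nat.le_of_lt (Nat.lt_two_pow_self)
  have := pvLoopA_pow (2 ^ k) 0 k (Nat.zero_le k) (by omega)
  simpa [GetNumQubits, htoNat] using this

theorem GetNumQubits_alt_pow (k : Nat) : GetNumQubits_alt (2 ^ k) = (k : Int) := by
  by_cases hk : k = 0
  · subst hk; simp [GetNumQubits_alt]
  · have h1 : (1 : Int) < 2 ^ k := by
      have : (2 : Int) ^ 0 < 2 ^ k := pow_lt_pow_right₀ (by norm_num) (by omega)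
      simpa using this
    have htoNat : ((2 : Int) ^ k).toNat = 2 ^ k := by
      have h : ((2 : Int) ^ k) = ((2 ^ k : Nat) : Int) := by push_cast; ring
      rw [h, Int.toNat_natCast]
    have hlog : Nat.log2 (2 ^ k) = k := Nat.log2_two_pow
    simp [GetNumQubits_alt, not_le.mpr h1, htoNat, hlog]

theorem GetNumQubits_le_one (n : Int) (h : n ≤ 1) : GetNumQubits n = 0 := by
  unfold GetNumQubits
  cases hn : n.toNat with
  | zero => simp [pvLoopA]
  | succ m =>
    have : ¬ ((1 : Int) < n) := by omega
    simp [pvLoopA, this]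

-- ===== VERDICT (by name: the statement is the Claim_ definition above) =====
theorem GetNumQubits_spec : Claim_equal_GetNumQubits := by
  intro n _ hpre
  unfold Spec_GetNumQubits
  rcases hpre with h1 | ⟨k, _, hk⟩
  · rw [GetNumQubits_le_one n h1]
    simp [GetNumQubits_alt, h1]
  · subst hk
    rw [GetNumQubits_pow, GetNumQubits_alt_pow]
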